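-- pv_equiv track=rewrite | github.com/RobinWillson/202602_MyStockViewer_V5 | scripts/reformat_api_docs.py | parse_grid_table
-- ===== SOURCE A (Python) =====
-- def parse_grid_table(lines):
--     rows = []
--     current_row = []
--
--     for line in lines:
--         if line.startswith("+-") or line.startswith("+=") or line.startswith("+:"):
--             if current_row:
--                 num_cols = max(len(r) for r in current_row)
--                 cols = [""] * num_cols
--                 for r in current_row:
--                     for i, c in enumerate(r):
--                         clean_c = c.strip().replace("**", "")
--                         if clean_c.endswith("\\"):
--                             # This slash typically means newline in the cell
--                             clean_c = clean_c[:-1] + "\n"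
--                         else:
--                             clean_c += " "
--                         cols[i] = cols[i] + clean_c
--                 rows.append([c.strip() for c in cols])
--                 current_row = []
--         elif line.startswith("|"):
--             parts = line.split("|")[1:-1]
--             current_row.append([p.strip() for p in parts])
--
--     return rows
-- ===== SOURCE B (Python) =====
-- def _clean(c):
--     c = c.strip().replace("**", "")
--     if c.endswith("\\"):
--         return c[:-1] + "\n"
--     return c + " "
--
--
-- def _cells(line):
--     return [p.strip() for p in line.split("|")[1:-1]]
--
--
-- def _merge(group):
--     width = max(map(len, group))
--     return ["".join(_clean(r[i]) for r in group if i < len(r)).strip()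
--             for i in range(width)]
--
--
-- def parse_grid_table(lines):
--     seps = [i for i, l in enumerate(lines)
--             if l.startswith(("+-", "+=", "+:"))]
--     rows = []
--     prev = 0
--     for s in seps:
--         group = [_cells(l) for l in lines[prev:s] if l.startswith("|")]
--         if group:
--             rows.append(_merge(group))
--         prev = s + 1
--     return rows
-- ===== Notes on version B (the rewrite author's own statement) =====
-- stated objective: alternative
-- what changed: Replaces A's single-pass mutable state machine (current_row buffer, cell-major enumerate writes into a preallocated cols array) with a slice-based pipeline: first compute the list of separator-line indices, then for each separator take the pipe-lines of the slice since the previous separator as a group and merge it column-major by str.join of the cleaned cells present in each column.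
import Mathlib
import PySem

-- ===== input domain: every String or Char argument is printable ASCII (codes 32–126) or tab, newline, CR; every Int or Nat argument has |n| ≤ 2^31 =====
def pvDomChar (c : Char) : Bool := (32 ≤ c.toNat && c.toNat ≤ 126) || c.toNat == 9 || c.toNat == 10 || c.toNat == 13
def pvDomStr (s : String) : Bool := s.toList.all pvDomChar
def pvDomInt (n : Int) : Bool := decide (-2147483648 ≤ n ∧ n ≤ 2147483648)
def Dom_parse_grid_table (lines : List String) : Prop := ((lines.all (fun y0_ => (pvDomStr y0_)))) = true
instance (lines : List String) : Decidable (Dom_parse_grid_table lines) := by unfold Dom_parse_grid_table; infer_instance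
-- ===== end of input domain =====

-- B replaces A's single-pass current_row state machine by a slice pipeline: separator indices
-- first, then each inter-separator slice is merged column-major by joining the cleaned cells.
-- Objective: alternative decomposition; same asymptotic cost, measured constant-factor speedup
-- (str.join of a column's cells instead of repeated string concatenation).


-- ===== PORT A =====
-- string concatenation s + t (exact: Python str '+' is list-of-codepoints append)
def pvCat (a b : String) : String := String.ofList (a.toList ++ b.toList)

def pvSepA (line : String) : Bool :=
  PySem.Str.startswith line "+-" || PySem.Str.startswith line "+=" || PySem.Str.startswith line "+:"

-- c.strip().replace("**",""); then clean_c[:-1]+"\n" if it ends with backslash else clean_c+" "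
def pvCleanA (c : String) : String :=
  let cc := PySem.Str.replace (PySem.Str.strip c) "**" ""
  if PySem.Str.endswith cc "\\" then pvCat (PySem.Str.slice cc none (some (-1))) "\n"
  else pvCat cc " "

-- [p.strip() for p in line.split("|")[1:-1]]
def pvSplitRowA (line : String) : List String :=
  (PySem.List.slice ((PySem.Str.split? line "|").getD []) (some 1) (some (-1))).map PySem.Str.strip

-- the body of A's separator branch: merge current_row into one parsed row
def pvMergeA (cur : List (List String)) : List String :=
  let num_cols := ((PySem.List.max? (cur.map (fun r => r.length)) (fun n => n)).getD 0)
  let cols := List.replicate num_cols ""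
  let cols := cur.foldl (fun cols r =>
      (PySem.List.enumerate r 0).foldl (fun cols p =>
        PySem.List.pySetD cols p.1 (pvCat (PySem.List.pyGetD cols p.1 "") (pvCleanA p.2))) cols) cols
  cols.map PySem.Str.strip

def parse_grid_table (lines : List String) : List (List String) :=
  (lines.foldl (fun (st : List (List String) × List (List String)) line =>
      if pvSepA line then
        if st.2.isEmpty then st
        else (st.1 ++ [pvMergeA st.2], [])
      else if PySem.Str.startswith line "|" then
        (st.1, st.2 ++ [pvSplitRowA line])
      else st) ([], [])).1

-- ===== PORT B =====
-- line.startswith(("+-", "+=", "+:"))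
def pvSepB (line : String) : Bool :=
  [("+-" : String), "+=", "+:"].any (fun p => PySem.Str.startswith line p)

-- _clean, written on the char-list side: strip, drop '**', then backslash→newline or a space
def pvCleanB (c : String) : String :=
  let l := PySem.Chars.replace (PySem.Chars.strip c.toList) ['*', '*'] []
  String.ofList (if PySem.Chars.endswith l ['\\'] then l.dropLast ++ ['\n'] else l ++ [' '])

-- _cells: line.split("|")[1:-1], each stripped
def pvCellsB (line : String) : List String :=
  ((((PySem.Str.split? line "|").getD []).drop 1).dropLast).map PySem.Str.strip

-- width = max(map(len, group)); max of a (nonempty) list of Nats as a fold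
def pvWidthB (g : List (List String)) : Nat := (g.map (fun r => r.length)).foldl max 0

-- _merge: per column, join the cleaned cells present in that column, then strip
def pvMergeB (g : List (List String)) : List String :=
  (List.range (pvWidthB g)).map (fun i =>
    PySem.Str.strip (String.ofList
      (((g.filterMap (fun r => r[i]?)).map (fun c => (pvCleanB c).toList)).flatten)))

-- seps = [i for i, l in enumerate(lines) if l.startswith(("+-", "+=", "+:"))]
def pvSepIdxB (lines : List String) : List Int :=
  (PySem.List.enumerate lines 0).filterMap (fun p => if pvSepB p.2 then some p.1 else none)

def parse_grid_table_alt (lines : List String) : List (List String) :=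
  ((pvSepIdxB lines).foldl (fun (st : List (List String) × Int) s =>
      let group := ((PySem.List.slice lines (some st.2) (some s)).filter
          (fun l => PySem.Str.startswith l "|")).map pvCellsB
      (if group.isEmpty then st.1 else st.1 ++ [pvMergeB group], s + 1)) ([], 0)).1

-- ===== PRECONDITION & SPEC =====
def Spec_parse_grid_table (lines : List String) (out : List (List String)) : Prop := out = parse_grid_table_alt lines
instance (lines : List String) (out : List (List String)) : Decidable (Spec_parse_grid_table lines out) := by unfold Spec_parse_grid_table; infer_instance

-- ===== CLAIM (what is proved, stated in full; the proofs are below) =====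
def Claim_equal_parse_grid_table : Prop := ∀ (lines : List String), Dom_parse_grid_table lines → Spec_parse_grid_table lines (parse_grid_table lines)

-- ===== LEMMAS AND PROOFS =====

-- ---- components of A rewritten as components of B ----

theorem pvSep_eq (l : String) : pvSepA l = pvSepB l := by
  simp [pvSepA, pvSepB, Bool.or_assoc]

theorem pvClean_eq (c : String) : pvCleanA c = pvCleanB c := by
  simp only [pvCleanA, pvCleanB, pvCat]
  have hl : (PySem.Str.replace (PySem.Str.strip c) "**" "").toList
      = PySem.Chars.replace (PySem.Chars.strip c.toList) ['*', '*'] [] := by simp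
  rw [← hl]
  cases h : PySem.Chars.endswith (PySem.Str.replace (PySem.Str.strip c) "**" "").toList ['\\'] <;>
    rw [hl] at h <;> simp [h, PySem.List.slice_to_neg_one]

theorem pvSlice_one_negOne {α : Type} (l : List α) :
    PySem.List.slice l (some 1) (some (-1)) = (l.drop 1).dropLast := by
  cases l with
  | nil => rfl
  | cons x xs =>
      simp [PySem.List.slice, PySem.List.clampIdx, List.dropLast_eq_take]
      split <;> omega

theorem pvCells_eq (line : String) : pvSplitRowA line = pvCellsB line := by
  unfold pvSplitRowA pvCellsB
  rw [pvSlice_one_negOne]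

theorem pvFoldlMax_le (xs : List Nat) : ∀ a m : Nat, a ≤ m → (∀ x ∈ xs, x ≤ m) →
    xs.foldl max a ≤ m := by
  induction xs with
  | nil => intro a m h _; simpa using h
  | cons x xs ih =>
      intro a m ha hx
      simp only [List.foldl_cons]
      exact ih _ m (by have := hx x (by simp); omega) (fun y hy => hx y (by simp [hy]))

theorem pvWidth_eq (g : List (List String)) :
    ((PySem.List.max? (g.map (fun r => r.length)) (fun n => n)).getD 0) = pvWidthB g := by
  cases h : PySem.List.max? (g.map (fun r => r.length)) (fun n => n) with
  | none =>
      have hg := (PySem.List.max?_eq_none_iff _ _).mp h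
      simp at hg
      simp [hg, pvWidthB]
  | some m =>
      have hmem := PySem.List.max?_mem h
      have hmax := PySem.List.max?_isMax h
      have h1 : m ≤ (g.map (fun r => r.length)).foldl max 0 :=
        (PySem.List.le_foldl_max _ _).2 m hmem
      have h2 : (g.map (fun r => r.length)).foldl max 0 ≤ m :=
        pvFoldlMax_le _ 0 m (by omega) hmax
      simp [pvWidthB]
      omega

-- ---- A's merge equals B's merge ----

-- one column-i accumulator step of the common column view
def pvGStep (i : Nat) (acc : String) (r : List String) : String :=
  if i < r.length then pvCat acc (pvCleanA (r.getD i "")) else acc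

-- A's inner enumerate-fold, applied to row r
def pvApplyRow (cols : List String) (r : List String) (s : Int) : List String :=
  (PySem.List.enumerate r s).foldl (fun cols p =>
    PySem.List.pySetD cols p.1 (pvCat (PySem.List.pyGetD cols p.1 "") (pvCleanA p.2))) cols

theorem pvApplyRow_spec (r : List String) (s : Nat) (cols : List String)
    (h : s + r.length ≤ cols.length) :
    (pvApplyRow cols r s).length = cols.length ∧
    ∀ i : Nat, (pvApplyRow cols r s).getD i "" =
      if s ≤ i ∧ i < s + r.length then pvCat (cols.getD i "") (pvCleanA (r.getD (i - s) ""))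
      else cols.getD i "" := by
  induction r generalizing s cols with
  | nil =>
      refine ⟨rfl, fun i => ?_⟩
      simp only [pvApplyRow, PySem.List.enumerate_nil, List.foldl_nil, List.length_nil]
      rw [if_neg (by omega)]
  | cons c r ih =>
      have hs : s < cols.length := by simp at h; omega
      simp only [pvApplyRow, PySem.List.enumerate_cons, List.foldl_cons] at *
      have hset : PySem.List.pySetD cols (s : Int) (pvCat (PySem.List.pyGetD cols (s : Int) "") (pvCleanA c))
          = cols.set s (pvCat (cols.getD s "") (pvCleanA c)) := by
        rw [PySem.List.pySetD_natCast, PySem.List.pyGetD_natCast]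
      set v := pvCat (cols.getD s "") (pvCleanA c) with hv
      have hgetset : ∀ j : Nat, (cols.set s v).getD j "" = if j = s then v else cols.getD j "" := by
        intro j
        simp only [List.getD_eq_getElem?_getD, List.getElem?_set]
        by_cases hj : j = s
        · subst hj; rw [if_pos rfl, if_pos rfl, if_pos hs]; rfl
        · rw [if_neg hj, if_neg (fun hh => hj hh.symm)]
      have hcast : ((s : Int) + 1) = ((s + 1 : Nat) : Int) := by push_cast; ring
      rw [hset, hcast]
      have hlen : (s + 1) + r.length ≤ (cols.set s v).length := by
        simp at h ⊢; omega
      obtain ⟨ihl, ihg⟩ := ih (s + 1) _ hlen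
      refine ⟨by rw [ihl]; simp, fun i => ?_⟩
      rw [ihg i, hgetset i]
      by_cases hA : i = s
      · subst hA
        rw [if_neg (by omega), if_pos rfl, if_pos (by simp), hv]
        simp [List.getD]
      · rw [if_neg hA]
        by_cases hB : s + 1 ≤ i ∧ i < s + 1 + r.length
        · rw [if_pos hB, if_pos (by simp; omega)]
          have hsub : i - s = (i - (s + 1)) + 1 := by omega
          rw [hsub]
          simp [List.getD]
        · rw [if_neg hB, if_neg (by simp; omega)]

theorem pvFold_spec (cur : List (List String)) (cols : List String)
    (h : ∀ r ∈ cur, r.length ≤ cols.length) :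
    (cur.foldl (fun cols r => pvApplyRow cols r 0) cols).length = cols.length ∧
    ∀ i : Nat, (cur.foldl (fun cols r => pvApplyRow cols r 0) cols).getD i "" =
      cur.foldl (fun acc r => pvGStep i acc r) (cols.getD i "") := by
  induction cur generalizing cols with
  | nil => exact ⟨rfl, fun i => rfl⟩
  | cons r cur ih =>
      simp only [List.foldl_cons]
      have hr : r.length ≤ cols.length := h r (by simp)
      obtain ⟨al, ag⟩ := pvApplyRow_spec r 0 cols (by omega)
      simp only [Nat.cast_zero] at al ag
      have h' : ∀ r' ∈ cur, r'.length ≤ (pvApplyRow cols r 0).length := by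
        intro r' hr'; rw [al]; exact h r' (by simp [hr'])
      obtain ⟨ihl, ihg⟩ := ih (pvApplyRow cols r 0) h'
      refine ⟨by rw [ihl, al], fun i => ?_⟩
      rw [ihg i, ag i]
      have hstep : pvGStep i (cols.getD i "") r =
          if 0 ≤ i ∧ i < 0 + r.length then pvCat (cols.getD i "") (pvCleanA (r.getD (i - 0) ""))
          else cols.getD i "" := by
        simp only [pvGStep, Nat.sub_zero, Nat.zero_add]
        split_ifs with h1 h2 h2
        · rfl
        · omega
        · omega
        · rfl
      rw [← hstep]

-- the column-i fold IS the join of the cleaned cells present in column i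
theorem pvJoin_eq (g : List (List String)) (i : Nat) : ∀ acc : String,
    g.foldl (fun acc r => pvGStep i acc r) acc
      = String.ofList (acc.toList ++
          ((g.filterMap (fun r => r[i]?)).map (fun c => (pvCleanB c).toList)).flatten) := by
  induction g with
  | nil => intro acc; simp [String.ofList_toList]
  | cons r g ih =>
      intro acc
      simp only [List.foldl_cons, List.filterMap_cons]
      by_cases h : i < r.length
      · have h1 : r[i]? = some r[i] := List.getElem?_eq_getElem h
        have h2 : r.getD i "" = r[i] := by simp [List.getD_eq_getElem?_getD, h1]
        rw [show pvGStep i acc r = pvCat acc (pvCleanA (r.getD i "")) from if_pos h, ih]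
        simp [h1, pvCat, pvClean_eq]
      · have h1 : r[i]? = none := List.getElem?_eq_none (by omega)
        rw [show pvGStep i acc r = acc from if_neg h, ih]
        simp [h1]

theorem pvMerge_eq (cur : List (List String)) : pvMergeA cur = pvMergeB cur := by
  unfold pvMergeA pvMergeB
  rw [pvWidth_eq]
  set n := pvWidthB cur with hn
  have hnle : ∀ r ∈ cur, r.length ≤ n := by
    intro r hr
    exact (PySem.List.le_foldl_max _ _).2 r.length (List.mem_map_of_mem hr)
  obtain ⟨hl, hg⟩ := pvFold_spec cur (List.replicate n "")
    (by intro r hr; simpa using hnle r hr)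
  show (cur.foldl (fun cols r => pvApplyRow cols r 0) (List.replicate n "")).map PySem.Str.strip
      = (List.range n).map (fun i =>
          PySem.Str.strip (String.ofList
            (((cur.filterMap (fun r => r[i]?)).map (fun c => (pvCleanB c).toList)).flatten)))
  apply List.ext_getElem
  · simpa using hl
  · intro i h1 h2
    simp only [List.getElem_map, List.getElem_range]
    have hi : i < (cur.foldl (fun cols r => pvApplyRow cols r 0) (List.replicate n "")).length := by
      simpa using h1
    have hgd : (cur.foldl (fun cols r => pvApplyRow cols r 0) (List.replicate n "")).getD i "" =
        (cur.foldl (fun cols r => pvApplyRow cols r 0) (List.replicate n ""))[i] := by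
      rw [List.getD_eq_getElem?_getD, List.getElem?_eq_getElem hi]
      rfl
    have hin : i < n := by simpa using h2
    have hgi := hg i
    rw [hgd] at hgi
    have hrep : (List.replicate n "").getD i "" = "" := by
      rw [List.getD_eq_getElem?_getD]
      simp [hin]
    rw [hrep] at hgi
    rw [hgi, pvJoin_eq cur i ""]
    simp

-- ---- the grouping: both programs compute the same recursive specification ----

-- recursive specification: emit the merge of each non-empty buffer closed by a separator
def pvGo : List String → List (List String) → List (List String)
  | [], _ => []
  | l :: ls, buf =>
    if pvSepB l then
      (if buf.isEmpty then [] else [pvMergeB buf]) ++ pvGo ls []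
    else if PySem.Str.startswith l "|" then pvGo ls (buf ++ [pvCellsB l])
    else pvGo ls buf

-- A's fold accumulates exactly pvGo
theorem pvA_loop (ls : List String) : ∀ (acc buf : List (List String)),
    (ls.foldl (fun (st : List (List String) × List (List String)) line =>
      if pvSepA line then
        if st.2.isEmpty then st
        else (st.1 ++ [pvMergeA st.2], [])
      else if PySem.Str.startswith line "|" then
        (st.1, st.2 ++ [pvSplitRowA line])
      else st) (acc, buf)).1 = acc ++ pvGo ls buf := by
  induction ls with
  | nil => intro acc buf; simp [pvGo]
  | cons l ls ih =>
      intro acc buf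
      simp only [List.foldl_cons, pvGo, pvSep_eq l]
      by_cases hsep : pvSepB l = true
      · rw [if_pos hsep, if_pos hsep]
        by_cases hemp : buf.isEmpty = true
        · rw [if_pos hemp, if_pos hemp, ih acc buf]
          cases hbuf : buf with
          | nil => simp
          | cons b bs => rw [hbuf] at hemp; simp at hemp
        · rw [if_neg hemp, if_neg hemp, ih (acc ++ [pvMergeA buf]) [], pvMerge_eq]
          simp
      · rw [if_neg hsep, if_neg hsep]
        by_cases hpipe : PySem.Str.startswith l "|" = true
        · rw [if_pos hpipe, if_pos hpipe, ih acc (buf ++ [pvSplitRowA l]), pvCells_eq]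
        · rw [if_neg hpipe, if_neg hpipe, ih acc buf]

-- Nat-indexed separator positions (proof-side view of pvSepIdxB)
def pvSepIdxN : List String → Nat → List Nat
  | [], _ => []
  | l :: ls, k => (if pvSepB l then [k] else []) ++ pvSepIdxN ls (k + 1)

theorem pvSepIdx_eq (ls : List String) : ∀ k : Nat,
    (PySem.List.enumerate ls (k : Int)).filterMap (fun p => if pvSepB p.2 then some p.1 else none)
      = (pvSepIdxN ls k).map (fun n : Nat => (n : Int)) := by
  induction ls with
  | nil => intro k; rfl
  | cons l ls ih =>
      intro k
      rw [PySem.List.enumerate_cons]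
      have hc : (k : Int) + 1 = ((k + 1 : Nat) : Int) := by push_cast; ring
      simp only [List.filterMap_cons, hc, ih (k + 1), pvSepIdxN]
      cases h : pvSepB l
      · simp
      · simp [h]

theorem pvSepIdxN_append (xs ys : List String) : ∀ k : Nat,
    pvSepIdxN (xs ++ ys) k = pvSepIdxN xs k ++ pvSepIdxN ys (k + xs.length) := by
  induction xs with
  | nil => intro k; simp [pvSepIdxN]
  | cons x xs ih =>
      intro k
      simp only [List.cons_append, pvSepIdxN, ih (k + 1), List.length_cons, List.append_assoc]
      have : k + 1 + xs.length = k + (xs.length + 1) := by omega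
      rw [this]

theorem pvSepIdxN_nil_of_nosep (xs : List String) : ∀ k : Nat,
    (∀ l ∈ xs, pvSepB l = false) → pvSepIdxN xs k = [] := by
  induction xs with
  | nil => intro k _; rfl
  | cons x xs ih =>
      intro k h
      simp only [pvSepIdxN, h x (by simp), ih (k + 1) (fun l hl => h l (by simp [hl]))]
      rfl

-- the B fold step, named (definitionally the lambda in parse_grid_table_alt)
def pvStepL (lines : List String) (st : List (List String) × Int) (s : Int) :
    List (List String) × Int :=
  let group := ((PySem.List.slice lines (some st.2) (some s)).filter
      (fun l => PySem.Str.startswith l "|")).map pvCellsB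
  (if group.isEmpty then st.1 else st.1 ++ [pvMergeB group], s + 1)

-- the B fold over separator indices computes pvGo, with the already-scanned prefix
-- 'front ++ pre' of the line list (front before the last separator, pre the open buffer)
theorem pvB_main (ls : List String) : ∀ (pre front : List String) (acc : List (List String)),
    (∀ l ∈ pre, pvSepB l = false) →
    (((pvSepIdxN (pre ++ ls) front.length).map (fun n : Nat => (n : Int))).foldl
      (pvStepL (front ++ pre ++ ls)) (acc, (front.length : Int))).1
    = acc ++ pvGo ls ((pre.filter (fun l => PySem.Str.startswith l "|")).map pvCellsB) := by
  induction ls with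
  | nil =>
      intro pre front acc hpre
      rw [pvSepIdxN_nil_of_nosep (pre ++ []) front.length (by simpa using hpre)]
      simp [pvGo]
  | cons l ls ih =>
      intro pre front acc hpre
      by_cases hsep : pvSepB l = true
      · -- a separator closes the buffer pre
        rw [pvSepIdxN_append pre (l :: ls) front.length,
            pvSepIdxN_nil_of_nosep pre front.length hpre]
        simp only [List.nil_append, pvSepIdxN, hsep, if_pos, List.singleton_append,
          List.map_cons, List.foldl_cons]
        set buf := (pre.filter (fun l => PySem.Str.startswith l "|")).map pvCellsB with hbuf
        have happ : pvStepL (front ++ pre ++ (l :: ls)) (acc, (front.length : Int))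
            ((front.length + pre.length : Nat) : Int)
            = (if buf.isEmpty then acc else acc ++ [pvMergeB buf],
               ((front.length + pre.length + 1 : Nat) : Int)) := by
          have hslice : PySem.List.slice (front ++ pre ++ (l :: ls)) (some (front.length : Int))
              (some ((front.length + pre.length : Nat) : Int)) = pre := by
            rw [PySem.List.slice_natCast, List.append_assoc, List.drop_left]
            have h2 : front.length + pre.length - front.length = pre.length := by omega
            rw [h2, List.take_left]
          have hc : ((front.length + pre.length : Nat) : Int) + 1
              = ((front.length + pre.length + 1 : Nat) : Int) := by push_cast; ring
          simp only [pvStepL, hslice, hc, hbuf]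
        rw [happ]
        have ih' := ih [] (front ++ pre ++ [l])
          (if buf.isEmpty then acc else acc ++ [pvMergeB buf]) (by simp)
        have hlen : (front ++ pre ++ [l]).length = front.length + pre.length + 1 := by
          simp; omega
        rw [hlen] at ih'
        simp only [List.nil_append, List.append_assoc, List.singleton_append] at ih' ⊢
        rw [ih']
        by_cases hb : buf.isEmpty = true
        · have hbn : buf = [] := by
            cases hbb : buf with
            | nil => rfl
            | cons a as => rw [hbb] at hb; simp at hb
          simp [pvGo, hsep, hbn]
        · simp [pvGo, hsep, hb]
      · -- not a separator: l joins the open prefix pre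
        have hps : pre ++ (l :: ls) = (pre ++ [l]) ++ ls := by simp
        have hps2 : front ++ pre ++ (l :: ls) = front ++ (pre ++ [l]) ++ ls := by simp
        rw [hps, hps2]
        rw [ih (pre ++ [l]) front acc
          (by intro x hx
              rcases List.mem_append.mp hx with h1 | h1
              · exact hpre x h1
              · simp at h1; subst h1; simpa using hsep)]
        congr 1
        rw [List.filter_append, List.map_append]
        by_cases hpipe : PySem.Str.startswith l "|" = true <;>
          simp at hpipe <;>
          simp [pvGo, hsep, hpipe]

-- ===== VERDICT (by name: the statement is the Claim_ definition above) =====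
theorem parse_grid_table_spec : Claim_equal_parse_grid_table := by
  intro lines _
  unfold Spec_parse_grid_table parse_grid_table
  show _ = ((pvSepIdxB lines).foldl (pvStepL lines) ([], 0)).1
  rw [pvA_loop lines [] []]
  unfold pvSepIdxB
  rw [show (0 : Int) = ((0 : Nat) : Int) from rfl, pvSepIdx_eq lines 0]
  have hmain := pvB_main lines [] [] [] (by simp)
  simp only [List.nil_append, List.length_nil, Nat.cast_zero, List.filter_nil,
    List.map_nil] at hmain
  simp only [Nat.cast_zero, List.nil_append]
  rw [hmain]
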